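-- pv_equiv track=rewrite | github.com/pwmcclung/newCodeProbs | centre.py | is_in_middle
-- ===== SOURCE A (Python) =====
-- def is_in_middle(sequence):
--     n = len(sequence)
--     for i in range(n - 2):
--         if sequence[i:i + 3] == "abc":
--             left_len = i
--             right_len = n - i - 3
--             if abs(left_len - right_len) <= 1:
--                 return True
--     return False
-- ===== SOURCE B (Python) =====
-- def is_in_middle(sequence):
--     # O(1): a centered "abc" can only start where |2*i - n + 3| <= 1,
--     # i.e. at one of at most two positions around (n-3)/2.
--     n = len(sequence)
--     for i in ((n - 4) // 2, (n - 3) // 2, (n - 2) // 2):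
--         if 0 <= i <= n - 3 and abs(2 * i - n + 3) <= 1 and sequence[i:i + 3] == "abc":
--             return True
--     return False
-- ===== Notes on version B (the rewrite author's own statement) =====
-- stated objective: faster
-- what changed: Instead of scanning every window of length 3, B solves |2i-n+3|<=1 for i and checks only the at-most-two candidate start positions around the centre.
import Mathlib
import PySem

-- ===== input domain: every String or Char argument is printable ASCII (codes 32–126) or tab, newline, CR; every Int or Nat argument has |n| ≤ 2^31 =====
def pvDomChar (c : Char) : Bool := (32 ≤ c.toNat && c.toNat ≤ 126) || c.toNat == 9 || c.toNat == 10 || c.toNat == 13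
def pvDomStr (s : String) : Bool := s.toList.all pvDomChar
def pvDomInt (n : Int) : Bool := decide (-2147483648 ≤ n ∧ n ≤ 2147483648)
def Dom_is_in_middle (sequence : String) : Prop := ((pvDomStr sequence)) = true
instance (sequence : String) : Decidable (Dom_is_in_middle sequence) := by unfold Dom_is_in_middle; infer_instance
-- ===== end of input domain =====

-- B checks only the O(1) candidate start positions solving |2i-n+3|<=1 instead of scanning all windows (faster).

-- ===== PORT A =====
-- the loop body of A: first match of "abc", then the centredness test; else continue
def isInMiddleLoopA (cs : List Char) (n : Int) : List Int → Bool
  | [] => false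
  | i :: rest =>
    if PySem.List.slice cs (some i) (some (i + 3)) = ['a', 'b', 'c'] then
      let left_len := i
      let right_len := n - i - 3
      if (left_len - right_len).natAbs ≤ 1 then true
      else isInMiddleLoopA cs n rest
    else isInMiddleLoopA cs n rest

def is_in_middle (sequence : String) : Bool :=
  let n : Int := PySem.Str.len sequence
  isInMiddleLoopA sequence.toList n (PySem.List.pyRange 0 (n - 2) 1)

-- ===== PORT B =====
def is_in_middle_alt (sequence : String) : Bool :=
  let n : Int := PySem.Str.len sequence
  [PySem.Int.floordiv (n - 4) 2, PySem.Int.floordiv (n - 3) 2, PySem.Int.floordiv (n - 2) 2].any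
    (fun i =>
      decide (0 ≤ i) && decide (i ≤ n - 3) && decide ((2 * i - n + 3).natAbs ≤ 1) &&
        decide (PySem.List.slice sequence.toList (some i) (some (i + 3)) = ['a', 'b', 'c']))

-- ===== PRECONDITION & SPEC =====
def Spec_is_in_middle (sequence : String) (out : Bool) : Prop := out = is_in_middle_alt sequence
instance (sequence : String) (out : Bool) : Decidable (Spec_is_in_middle sequence out) := by unfold Spec_is_in_middle; infer_instance

-- ===== CLAIM (what is proved, stated in full; the proofs are below) =====
def Claim_equal_is_in_middle : Prop := ∀ (sequence : String), Dom_is_in_middle sequence → Spec_is_in_middle sequence (is_in_middle sequence)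

-- ===== LEMMAS AND PROOFS =====

-- A's early-return loop is an 'any' over its index list
theorem isInMiddleLoopA_eq_any (cs : List Char) (n : Int) (l : List Int) :
    isInMiddleLoopA cs n l =
      l.any (fun i =>
        decide (PySem.List.slice cs (some i) (some (i + 3)) = ['a', 'b', 'c']) &&
          decide ((i - (n - i - 3)).natAbs ≤ 1)) := by
  induction l with
  | nil => rfl
  | cons i rest ih =>
    simp only [isInMiddleLoopA, List.any_cons, ih]
    by_cases h1 : PySem.List.slice cs (some i) (some (i + 3)) = ['a', 'b', 'c'] <;>
      by_cases h2 : (i - (n - i - 3)).natAbs ≤ 1 <;> simp [h1, h2]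

theorem is_in_middle_eq_alt (sequence : String) :
    is_in_middle sequence = is_in_middle_alt sequence := by
  unfold is_in_middle is_in_middle_alt
  rw [isInMiddleLoopA_eq_any]
  set cs := sequence.toList with hcs
  set n : Int := PySem.Str.len sequence with hn
  apply Bool.eq_iff_iff.mpr
  simp only [List.any_eq_true, PySem.List.mem_pyRange_one, List.mem_cons,
    List.not_mem_nil, or_false, Bool.and_eq_true, decide_eq_true_eq]
  constructor
  · rintro ⟨i, ⟨h0, h2⟩, hsl, habs⟩
    refine ⟨i, ?_, ⟨⟨h0, by omega⟩, by omega⟩, hsl⟩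
    -- |2i-n+3| ≤ 1 forces 2i ∈ {n-4, n-3, n-2}, i.e. i is one of the floordivs
    have : 2 * i = n - 4 ∨ 2 * i = n - 3 ∨ 2 * i = n - 2 := by omega
    rcases this with h | h | h
    · have hq : PySem.Int.floordiv (n - 4) 2 = i := by
        rw [PySem.Int.floordiv_eq_iff_of_pos (by omega)]; omega
      exact Or.inl hq.symm
    · have hq : PySem.Int.floordiv (n - 3) 2 = i := by
        rw [PySem.Int.floordiv_eq_iff_of_pos (by omega)]; omega
      exact Or.inr (Or.inl hq.symm)
    · have hq : PySem.Int.floordiv (n - 2) 2 = i := by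
        rw [PySem.Int.floordiv_eq_iff_of_pos (by omega)]; omega
      exact Or.inr (Or.inr hq.symm)
  · rintro ⟨i, _, ⟨⟨h0, h3⟩, habs⟩, hsl⟩
    exact ⟨i, ⟨h0, by omega⟩, hsl, by omega⟩

-- ===== VERDICT (by name: the statement is the Claim_ definition above) =====
theorem is_in_middle_spec : Claim_equal_is_in_middle := by
  intro sequence _
  unfold Spec_is_in_middle
  exact is_in_middle_eq_alt sequence
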